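-- pv_equiv track=rewrite | github.com/doubleZ0108/Leetcode | python/1803.统计异或值在范围内的数对有多少.py | countPairs1
-- ===== SOURCE A (Python) =====
-- from typing import List
--
-- def countPairs1(nums: List[int], low: int, high: int) -> int:
--     res = 0
--     for i in range(len(nums)):
--         for j in range(i+1, len(nums)):
--             tmp = nums[i] ^ nums[j]
--             if tmp >= low and tmp <= high:
--                 res += 1
--     return res
-- ===== SOURCE B (Python) =====
-- def countPairs1(nums, low, high):
--     cnt = {}
--     res = 0
--     for x in nums:
--         for v, c in cnt.items():
--             if low <= x ^ v <= high:
--                 res += c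
--         cnt[x] = cnt.get(x, 0) + 1
--     return res
-- ===== Notes on version B (the rewrite author's own statement) =====
-- stated objective: alternative
-- what changed: Replaces the nested index loops over all pairs by a single pass that maintains a frequency dictionary of the values seen so far and, for each new element, adds the multiplicities of the distinct earlier values whose XOR with it lies in [low, high].
import Mathlib
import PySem

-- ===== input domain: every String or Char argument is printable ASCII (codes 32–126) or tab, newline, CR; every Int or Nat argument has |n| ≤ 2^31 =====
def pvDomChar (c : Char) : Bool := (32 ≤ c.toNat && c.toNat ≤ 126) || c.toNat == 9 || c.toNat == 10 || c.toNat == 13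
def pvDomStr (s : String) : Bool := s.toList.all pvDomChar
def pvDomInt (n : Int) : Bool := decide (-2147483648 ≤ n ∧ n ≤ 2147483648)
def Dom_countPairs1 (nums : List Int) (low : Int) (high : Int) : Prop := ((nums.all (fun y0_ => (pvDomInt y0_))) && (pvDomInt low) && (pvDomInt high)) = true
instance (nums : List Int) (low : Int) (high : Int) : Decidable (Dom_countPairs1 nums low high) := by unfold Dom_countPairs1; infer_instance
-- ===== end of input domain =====

-- B replaces A's nested all-pairs index loops by one pass over a frequency dictionary of the
-- values seen so far (objective: alternative — same worst-case cost, fewer steps with duplicates).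

-- ===== PORT A =====
def countPairs1 (nums : List Int) (low : Int) (high : Int) : Int :=
  (PySem.List.pyRange 0 (PySem.List.len nums) 1).foldl (fun res i =>
    (PySem.List.pyRange (i + 1) (PySem.List.len nums) 1).foldl (fun res j =>
      let tmp := PySem.Int.bxor (PySem.List.pyGetD nums i 0) (PySem.List.pyGetD nums j 0)
      if low ≤ tmp ∧ tmp ≤ high then res + 1 else res) res) 0

-- ===== PORT B =====
def countPairs1_alt (nums : List Int) (low : Int) (high : Int) : Int :=
  (nums.foldl (fun (st : PySem.Dict Int Int × Int) x =>
    let r := st.1.items.foldl (fun res vc =>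
      if low ≤ PySem.Int.bxor x vc.1 ∧ PySem.Int.bxor x vc.1 ≤ high then res + vc.2 else res) st.2
    (st.1.insert x (st.1.getD x 0 + 1), r)) (PySem.Dict.empty, 0)).2

-- ===== PRECONDITION & SPEC =====
def Spec_countPairs1 (nums : List Int) (low : Int) (high : Int) (out : Int) : Prop := out = countPairs1_alt nums low high
instance (nums : List Int) (low : Int) (high : Int) (out : Int) : Decidable (Spec_countPairs1 nums low high out) := by unfold Spec_countPairs1; infer_instance

-- ===== CLAIM (what is proved, stated in full; the proofs are below) =====
def Claim_equal_countPairs1 : Prop := ∀ (nums : List Int) (low : Int) (high : Int), Dom_countPairs1 nums low high → Spec_countPairs1 nums low high (countPairs1 nums low high)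

-- ===== LEMMAS AND PROOFS =====

-- the pair test "low <= x ^ y <= high", and the count of qualifying unordered pairs,
-- which both programs are shown to compute
def pcb (low high x y : Int) : Bool := decide (low ≤ PySem.Int.bxor x y ∧ PySem.Int.bxor x y ≤ high)

def pairCount (low high : Int) : List Int → Int
  | [] => 0
  | x :: l => (l.countP (pcb low high x) : Int) + pairCount low high l

theorem pcb_comm (low high x y : Int) : pcb low high x y = pcb low high y x := by
  simp [pcb, PySem.Int.bxor_comm]

-- ---- A-side: the nested index loops compute pairCount ----
theorem outer_loop (nums : List Int) (low high : Int) :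
    ∀ (k a : Nat) (res : Int), nums.length - a ≤ k → a ≤ nums.length →
    (PySem.List.pyRange (a : Int) (nums.length : Int) 1).foldl (fun res i =>
      (PySem.List.pyRange (i + 1) (nums.length : Int) 1).foldl (fun res j =>
        let tmp := PySem.Int.bxor (PySem.List.pyGetD nums i 0) (PySem.List.pyGetD nums j 0)
        if low ≤ tmp ∧ tmp ≤ high then res + 1 else res) res) res
      = res + pairCount low high (nums.drop a) := by
  intro k
  induction k with
  | zero =>
    intro a res h1 h2
    have ha : a = nums.length := by omega
    subst ha
    rw [PySem.List.pyRange_one_eq_nil (le_refl _)]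
    simp [pairCount]
  | succ k ih =>
    intro a res h1 h2
    rcases eq_or_lt_of_le h2 with ha | ha
    · subst ha
      rw [PySem.List.pyRange_one_eq_nil (le_refl _)]
      simp [pairCount]
    · rw [PySem.List.pyRange_one_cons (by exact_mod_cast ha), List.foldl_cons]
      have hc1 : ((a : Int) + 1) = ((a + 1 : Nat) : Int) := by push_cast; ring
      rw [hc1]
      rw [PySem.List.foldl_pyRange_pyGetD' nums 0
        (fun r v => if low ≤ PySem.Int.bxor (PySem.List.pyGetD nums (a : Int) 0) v ∧
            PySem.Int.bxor (PySem.List.pyGetD nums (a : Int) 0) v ≤ high then r + 1 else r)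
        res (by positivity)]
      rw [PySem.List.foldl_ite_add_one]
      rw [ih (a + 1) _ (by omega) (by omega)]
      have hget : PySem.List.pyGetD nums (a : Int) 0 = nums[a]'(by omega) := by
        rw [PySem.List.pyGetD_natCast, List.getD_eq_getElem _ _ (by omega)]
      have hdrop : nums.drop a = nums[a]'(by omega) :: nums.drop (a + 1) :=
        List.drop_eq_getElem_cons (by omega)
      rw [hdrop]
      simp only [Int.toNat_natCast, pairCount, hget]
      have hpcb : pcb low high (nums[a]'(by omega)) = fun x =>
          decide (low ≤ PySem.Int.bxor (nums[a]'(by omega)) x ∧ PySem.Int.bxor (nums[a]'(by omega)) x ≤ high) := rfl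
      rw [hpcb]
      ring

theorem A_eq (nums : List Int) (low high : Int) :
    countPairs1 nums low high = pairCount low high nums := by
  unfold countPairs1
  have h := outer_loop nums low high nums.length 0 0 (by omega) (by omega)
  simpa using h

-- ---- B-side: one dictionary pass computes pairCount as well ----

theorem sum_if_eq (y c : Int) : ∀ (S : List Int), S.Nodup → y ∈ S →
    (S.map (fun k => if k = y then c else 0)).sum = c := by
  intro S hnd hy
  induction S with
  | nil => simp at hy
  | cons a S ih =>
    rcases List.mem_cons.mp hy with h | h
    · subst h
      have hno := (List.nodup_cons.mp hnd).1
      have : ∀ k ∈ S, (if k = y then c else 0) = 0 := fun k hk => by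
        rcases eq_or_ne k y with h' | h'
        · exact absurd (h' ▸ hk) hno
        · simp [h']
      simp [List.map_congr_left this]
    · have hnd' := (List.nodup_cons.mp hnd).2
      have hay : a ≠ y := fun h' => (List.nodup_cons.mp hnd).1 (h' ▸ h)
      simp [hay, ih hnd' h]

-- summing "multiplicity of k in seen" over the distinct values of seen, restricted to a
-- predicate, is the plain countP over seen
theorem sum_count_over_set (p : Int → Bool) : ∀ (seen : List Int),
    ((PySem.Set.ofList seen).map (fun k => if p k then (seen.count k : Int) else 0)).sum
      = (seen.countP p : Int) := by
  intro seen
  induction seen using List.reverseRecOn with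
  | nil => simp
  | append_singleton seen y ih =>
    rw [PySem.Set.ofList_append_singleton]
    have hcnt : ∀ k, ((seen ++ [y]).count k : Int) = (seen.count k : Int) + (if k = y then 1 else 0) := by
      intro k; rcases eq_or_ne k y with h | h
      · subst h; simp [List.count_append]
      · simp [List.count_append, h, Ne.symm h]
    by_cases hy : y ∈ PySem.Set.ofList seen
    · rw [PySem.Set.add_of_mem hy]
      have hpt : ∀ k ∈ PySem.Set.ofList seen,
          (if p k then ((seen ++ [y]).count k : Int) else 0)
            = (if p k then (seen.count k : Int) else 0) + (if k = y then (if p y then 1 else 0) else 0) := by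
        intro k _; rw [hcnt k]; rcases eq_or_ne k y with h | h
        · subst h; split_ifs <;> ring
        · simp [h]
      rw [List.map_congr_left hpt, PySem.List.sum_map_add_int, ih,
        sum_if_eq y _ _ (PySem.Set.nodup_ofList seen) hy, List.countP_append]
      push_cast [List.countP_singleton]
      ring
    · rw [PySem.Set.add_of_not_mem hy]
      have hys : y ∉ seen := fun h => hy ((PySem.Set.mem_ofList seen y).mpr h)
      have hpt : ∀ k ∈ PySem.Set.ofList seen,
          (if p k then ((seen ++ [y]).count k : Int) else 0) = (if p k then (seen.count k : Int) else 0) := by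
        intro k hk
        have hne : k ≠ y := fun h' => hys (h' ▸ (PySem.Set.mem_ofList seen k).mp hk)
        rw [hcnt k]; simp [hne]
      rw [List.map_append, List.sum_append, List.map_congr_left hpt, ih]
      simp [List.count_eq_zero.mpr hys, List.countP_append, List.countP_singleton]

-- B's inner loop over the items of Counter(seen) adds exactly countP over seen
theorem items_sum_counter (low high x : Int) (seen : List Int) (r0 : Int) :
    ((PySem.Dict.counter seen : PySem.Dict Int Int)).items.foldl (fun res vc =>
      if low ≤ PySem.Int.bxor x vc.1 ∧ PySem.Int.bxor x vc.1 ≤ high then res + vc.2 else res) r0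
      = r0 + (seen.countP (fun y => decide (low ≤ PySem.Int.bxor x y ∧ PySem.Int.bxor x y ≤ high)) : Int) := by
  rw [PySem.Dict.items_counter, List.foldl_map]
  show List.foldl (fun r k =>
      if low ≤ PySem.Int.bxor x k ∧ PySem.Int.bxor x k ≤ high then r + (seen.count k : Int) else r)
      r0 (PySem.Set.ofList seen) = _
  rw [PySem.List.foldl_congr_mem _ _ (fun r k =>
      r + (if decide (low ≤ PySem.Int.bxor x k ∧ PySem.Int.bxor x k ≤ high) then (seen.count k : Int) else 0)) _
    (fun acc k _ => by by_cases h : low ≤ PySem.Int.bxor x k ∧ PySem.Int.bxor x k ≤ high <;> simp [h])]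
  rw [PySem.List.foldl_add _ (fun k =>
      (if decide (low ≤ PySem.Int.bxor x k ∧ PySem.Int.bxor x k ≤ high) then (seen.count k : Int) else 0))]
  rw [sum_count_over_set]

def between (low high : Int) (seen l : List Int) : Int :=
  (l.map (fun z => ((seen.countP (pcb low high z) : Nat) : Int))).sum

theorem between_append (low high x : Int) (seen l : List Int) :
    between low high (seen ++ [x]) l
      = between low high seen l + (l.countP (pcb low high x) : Int) := by
  unfold between
  have hsplit : ∀ z ∈ l, (((seen ++ [x]).countP (pcb low high z) : Nat) : Int)
      = ((seen.countP (pcb low high z) : Nat) : Int) + (if pcb low high z x then (1:Int) else 0) := by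
    intro z _
    rw [List.countP_append, List.countP_singleton]
    push_cast
    split_ifs <;> simp
  rw [List.map_congr_left hsplit, PySem.List.sum_map_add_int,
    PySem.List.sum_map_ite_one_zero (fun z => pcb low high z x) l]
  have : l.countP (fun z => pcb low high z x) = l.countP (pcb low high x) :=
    List.countP_congr (fun z _ => by rw [pcb_comm])
  rw [this]

theorem B_loop (low high : Int) :
    ∀ (l seen : List Int) (res : Int),
    (l.foldl (fun (st : PySem.Dict Int Int × Int) x =>
      let r := st.1.items.foldl (fun res vc =>
        if low ≤ PySem.Int.bxor x vc.1 ∧ PySem.Int.bxor x vc.1 ≤ high then res + vc.2 else res) st.2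
      (st.1.insert x (st.1.getD x 0 + 1), r)) (PySem.Dict.counter seen, res)).2
      = res + between low high seen l + pairCount low high l := by
  intro l
  induction l with
  | nil => intro seen res; simp [between, pairCount]
  | cons x l ih =>
    intro seen res
    rw [List.foldl_cons]
    show (l.foldl _ ((PySem.Dict.counter seen).insert x ((PySem.Dict.counter seen).getD x 0 + 1),
      (PySem.Dict.counter seen).items.foldl _ res)).2 = _
    have hd : (PySem.Dict.counter seen : PySem.Dict Int Int).insert x
        ((PySem.Dict.counter seen).getD x 0 + 1) = PySem.Dict.counter (seen ++ [x]) := by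
      rw [PySem.Dict.counter_append_singleton]; rfl
    rw [hd, items_sum_counter low high x seen res, ih (seen ++ [x])]
    rw [between_append]
    have hre : (fun y => decide (low ≤ PySem.Int.bxor x y ∧ PySem.Int.bxor x y ≤ high)) = pcb low high x := rfl
    rw [hre]
    simp only [between, List.map_cons, List.sum_cons, pairCount]
    ring

theorem B_eq (nums : List Int) (low high : Int) :
    countPairs1_alt nums low high = pairCount low high nums := by
  unfold countPairs1_alt
  show (nums.foldl _ (PySem.Dict.counter [], 0)).2 = _
  rw [B_loop]
  simp [between]

-- ===== VERDICT (by name: the statement is the Claim_ definition above) =====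
theorem countPairs1_spec : Claim_equal_countPairs1 := by
  intro nums low high _
  unfold Spec_countPairs1
  rw [A_eq, B_eq]
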